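-- pv_equiv track=rewrite | github.com/EricHeGitHub/python-predicting-stress-in-english-words | methods.py | stressLabel
-- ===== SOURCE A (Python) =====
-- def stressLabel(pronunciations):
--     position = 0
--     vowelSet = set(['AA','AE','AH', 'AO', 'AW', 'AY', 'EH', 'ER','EY', 'IH','IY','OW','OY','UH', 'UW'])
--     for element in pronunciations:
--         if (element[:-1] in vowelSet):
--             position = position + 1
--             if element[-1:] == '1':
--                 return position
--     return position
-- ===== SOURCE B (Python) =====
-- def stressLabel(pronunciations):
--     vowelSet = set(['AA','AE','AH', 'AO', 'AW', 'AY', 'EH', 'ER','EY', 'IH','IY','OW','OY','UH', 'UW'])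
--     vowels = [e for e in pronunciations if e[:-1] in vowelSet]
--     for i, e in enumerate(vowels):
--         if e[-1:] == '1':
--             return i + 1
--     return len(vowels)
-- ===== Notes on version B (the rewrite author's own statement) =====
-- stated objective: alternative
-- what changed: Replaces A's single counting loop (increment-and-test per element) with a filter pass that materializes the vowel sublist followed by a separate enumerate search for the first stress mark, falling back to the list's length.
import Mathlib
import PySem

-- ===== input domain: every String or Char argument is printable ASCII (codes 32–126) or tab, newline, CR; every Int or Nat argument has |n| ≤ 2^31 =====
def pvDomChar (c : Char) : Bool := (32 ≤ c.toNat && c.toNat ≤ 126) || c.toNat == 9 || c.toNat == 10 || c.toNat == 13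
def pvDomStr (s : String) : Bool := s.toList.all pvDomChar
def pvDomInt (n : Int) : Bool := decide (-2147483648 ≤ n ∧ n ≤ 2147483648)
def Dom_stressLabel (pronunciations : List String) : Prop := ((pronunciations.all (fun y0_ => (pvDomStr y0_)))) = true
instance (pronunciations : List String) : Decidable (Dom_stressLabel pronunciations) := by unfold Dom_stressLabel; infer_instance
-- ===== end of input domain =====

-- B: filter out the vowel elements first, then search that list for the first stress mark.
-- ===== PORT A =====
def pvVowelSet : List String := PySem.Set.ofList ["AA","AE","AH","AO","AW","AY","EH","ER","EY","IH","IY","OW","OY","UH","UW"]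
def pvIsVowel (e : String) : Bool := pvVowelSet.contains (PySem.Str.slice e none (some (-1)))
def pvIsStress (e : String) : Bool := PySem.Str.slice e (some (-1)) none == "1"

def stressGoA (position : Int) : List String → Int
  | [] => position
  | e :: rest =>
    if pvIsVowel e then
      (if pvIsStress e then position + 1 else stressGoA (position + 1) rest)
    else stressGoA position rest

def stressLabel (pronunciations : List String) : Int := stressGoA 0 pronunciations

-- ===== PORT B =====
def stressGoB (total : Int) (i : Int) : List String → Int
  | [] => total
  | e :: rest => if pvIsStress e then i + 1 else stressGoB total (i + 1) rest

def stressLabel_alt (pronunciations : List String) : Int :=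
  let vowels := pronunciations.filter pvIsVowel
  stressGoB (vowels.length : Int) 0 vowels

-- ===== PRECONDITION & SPEC =====
def Spec_stressLabel (pronunciations : List String) (out : Int) : Prop := out = stressLabel_alt pronunciations
instance (pronunciations : List String) (out : Int) : Decidable (Spec_stressLabel pronunciations out) := by unfold Spec_stressLabel; infer_instance

-- ===== CLAIM (what is proved, stated in full; the proofs are below) =====
def Claim_equal_stressLabel : Prop := ∀ (pronunciations : List String), Dom_stressLabel pronunciations → Spec_stressLabel pronunciations (stressLabel pronunciations)

-- ===== LEMMAS AND PROOFS =====

-- ===== VERDICT (by name: the statement is the Claim_ definition above) =====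
theorem stressGoA_eq_goB (xs : List String) : ∀ (pos : Int),
    stressGoA pos xs = stressGoB (pos + ((xs.filter pvIsVowel).length : Int)) pos (xs.filter pvIsVowel) := by
  induction xs with
  | nil => intro pos; simp [stressGoA, stressGoB]
  | cons e rest ih =>
    intro pos
    by_cases hv : pvIsVowel e
    · by_cases hs : pvIsStress e
      · simp [stressGoA, stressGoB, hv, hs]
      · simp only [stressGoA, stressGoB, hv, hs, List.filter_cons_of_pos, if_true, if_false,
          Bool.false_eq_true, List.length_cons]
        rw [ih (pos + 1)]
        congr 1
        push_cast
        ring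
    · rw [List.filter_cons_of_neg (by simp [hv])]
      simp only [stressGoA, hv, if_false, Bool.false_eq_true]
      exact ih pos

theorem stressLabel_spec : Claim_equal_stressLabel := by
  intro prons _
  unfold Spec_stressLabel stressLabel stressLabel_alt
  rw [stressGoA_eq_goB]
  simp
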